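-- pv_equiv track=rewrite | github.com/benoxoft/testimpSHARK | testimpshark/testimpshark.py | preprocess_file_for_import_detection
-- ===== SOURCE A (Python) =====
-- def preprocess_file_for_import_detection(contents):
--     """
--     Preprocess file for the import detection for the mocks
--     :param contents: file contents
--     :return:
--     """
--     new_contents = []
--     for i in range(len(contents)):
--         new_line = ""
--         line = contents[i]
--
--         if line.startswith('from') or line.startswith('import'):
--             new_line += line.strip()+' '
--             for next_line in contents[i+1:len(contents)]:
--                 if next_line.startswith('from') or next_line.startswith('import'):
--                     break
--                 elif not next_line.strip():
--                     break
--                 else: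
--                     new_line += next_line.strip()+' '
--             new_contents.append(new_line)
--     return new_contents
-- ===== SOURCE B (Python) =====
-- def preprocess_file_for_import_detection(contents):
--     """Single linear pass with a running accumulator (no inner rescan per import line)."""
--     result = []
--     current = None
--     for line in contents:
--         if line.startswith('from') or line.startswith('import'):
--             if current is not None:
--                 result.append(current)
--             current = line.strip() + ' '
--         elif current is not None:
--             s = line.strip()
--             if not s:
--                 result.append(current)
--                 current = None
--             else:
--                 current += s + ' '
--     if current is not None:
--         result.append(current)
--     return result
-- ===== Notes on version B (the rewrite author's own statement) =====
-- stated objective: simpler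
-- what changed: Replaced A's per-import-line rescan of all following lines with one linear pass keeping a running 'current' accumulator that is flushed on a new import line, a blank line, or at end of input.
import Mathlib
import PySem

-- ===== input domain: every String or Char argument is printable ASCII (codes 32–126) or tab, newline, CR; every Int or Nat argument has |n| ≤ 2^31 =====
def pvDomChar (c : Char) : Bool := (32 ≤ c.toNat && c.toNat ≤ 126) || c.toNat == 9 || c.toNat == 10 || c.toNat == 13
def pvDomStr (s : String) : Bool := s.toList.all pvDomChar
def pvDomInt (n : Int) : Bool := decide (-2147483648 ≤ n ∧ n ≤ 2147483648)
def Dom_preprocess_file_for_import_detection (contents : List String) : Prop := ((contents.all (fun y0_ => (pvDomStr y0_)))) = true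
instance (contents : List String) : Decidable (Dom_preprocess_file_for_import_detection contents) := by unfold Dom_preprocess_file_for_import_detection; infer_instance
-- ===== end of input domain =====

-- B replaces A's per-import-line rescan of the following lines by one linear pass with a
-- running accumulator flushed on a new import line, a blank line, or at end (objective: simpler).

-- ===== PORT A =====
-- 'line.startswith('from') or line.startswith('import')'
def pvIsImp (line : String) : Bool :=
  PySem.Str.startswith line "from" || PySem.Str.startswith line "import"

-- A's inner 'for next_line in contents[i+1:len(contents)]' loop with its two breaks,
-- accumulating into new_line
def pvJoinCont : List String → String → String
  | [], new_line => new_line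
  | next_line :: rest, new_line =>
    if pvIsImp next_line then new_line
    else if PySem.Str.strip next_line == "" then new_line
    else pvJoinCont rest (new_line ++ PySem.Str.strip next_line ++ " ")

-- A's outer 'for i in range(len(contents))': structural recursion carrying the suffix
-- (line = contents[i], rest = contents[i+1:len(contents)]) and the new_contents accumulator
def pvLoopA : List String → List String → List String
  | [], new_contents => new_contents
  | line :: rest, new_contents =>
    pvLoopA rest
      (if pvIsImp line then
        new_contents ++ [pvJoinCont rest (PySem.Str.strip line ++ " ")]
      else new_contents)

def preprocess_file_for_import_detection (contents : List String) : List String :=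
  pvLoopA contents []

-- ===== PORT B =====
-- Source B's loop body: state (current, result)
def pvStepB (st : Option String × List String) (line : String) : Option String × List String :=
  if pvIsImp line then
    (some (PySem.Str.strip line ++ " "),
      match st.1 with
      | some c => st.2 ++ [c]
      | none => st.2)
  else
    match st.1 with
    | some c =>
      let s := PySem.Str.strip line
      if s == "" then (none, st.2 ++ [c]) else (some (c ++ s ++ " "), st.2)
    | none => (none, st.2)

def preprocess_file_for_import_detection_alt (contents : List String) : List String :=
  let st := contents.foldl pvStepB (none, [])
  match st.1 with
  | some c => st.2 ++ [c]
  | none => st.2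

-- ===== PRECONDITION & SPEC =====
def Spec_preprocess_file_for_import_detection (contents : List String) (out : List String) : Prop := out = preprocess_file_for_import_detection_alt contents
instance (contents : List String) (out : List String) : Decidable (Spec_preprocess_file_for_import_detection contents out) := by unfold Spec_preprocess_file_for_import_detection; infer_instance

-- ===== CLAIM (what is proved, stated in full; the proofs are below) =====
def Claim_equal_preprocess_file_for_import_detection : Prop := ∀ (contents : List String), Dom_preprocess_file_for_import_detection contents → Spec_preprocess_file_for_import_detection contents (preprocess_file_for_import_detection contents)

-- ===== LEMMAS AND PROOFS =====

-- the output B emits from state current = cur while still having to process ls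
def pvEmit : Option String → List String → List String
  | none, [] => []
  | some s, [] => [s]
  | cur, l :: rest =>
    if pvIsImp l then
      (match cur with | some s => [s] | none => []) ++ pvEmit (some (PySem.Str.strip l ++ " ")) rest
    else
      match cur with
      | none => pvEmit none rest
      | some s =>
        if PySem.Str.strip l == "" then s :: pvEmit none rest
        else pvEmit (some (s ++ PySem.Str.strip l ++ " ")) rest

theorem pvStepB_foldl (ls : List String) (cur : Option String) (res : List String) :
    (let st := ls.foldl pvStepB (cur, res)
     match st.1 with | some c => st.2 ++ [c] | none => st.2) = res ++ pvEmit cur ls := by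
  induction ls generalizing cur res with
  | nil => cases cur <;> simp [pvEmit]
  | cons l rest ih =>
    simp only [List.foldl_cons, pvStepB]
    by_cases h : pvIsImp l = true
    · cases cur <;> simp [pvEmit, h, ih]
    · cases cur with
      | none => simp [pvEmit, h, ih]
      | some s =>
        by_cases hb : PySem.Str.strip l == ""
        · simp [pvEmit, h, hb, ih]
        · simp [pvEmit, h, hb, ih]

theorem pvEmit_some (ls : List String) (s : String) :
    pvEmit (some s) ls = pvJoinCont ls s :: pvEmit none ls := by
  induction ls generalizing s with
  | nil => simp [pvEmit, pvJoinCont]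
  | cons l rest ih =>
    by_cases h : pvIsImp l = true
    · simp [pvEmit, pvJoinCont, h]
    · by_cases hb : PySem.Str.strip l == ""
      · simp [pvEmit, pvJoinCont, h, hb]
      · simp [pvEmit, pvJoinCont, h, hb, ih]

theorem pvLoopA_eq (ls : List String) (acc : List String) :
    pvLoopA ls acc = acc ++ pvEmit none ls := by
  induction ls generalizing acc with
  | nil => simp [pvLoopA, pvEmit]
  | cons l rest ih =>
    by_cases h : pvIsImp l = true
    · simp [pvLoopA, pvEmit, h, ih, pvEmit_some]
    · simp [pvLoopA, pvEmit, h, ih]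

-- ===== VERDICT (by name: the statement is the Claim_ definition above) =====
theorem preprocess_file_for_import_detection_spec : Claim_equal_preprocess_file_for_import_detection := by
  intro contents _
  unfold Spec_preprocess_file_for_import_detection preprocess_file_for_import_detection
    preprocess_file_for_import_detection_alt
  rw [pvStepB_foldl, pvLoopA_eq]
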